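-- pv_equiv track=rewrite | github.com/beasteers/starstar | starstar/argparse.py | _repl_union
-- ===== SOURCE A (Python) =====
-- OPEN_BRACKET = '['
--
-- CLOSE_BRACKET = ']'
--
-- COMMA = ','
--
-- OR = '|'
--
-- def _repl_union(s: str):
--     """ Replace PEP 604-style annotations (i.e. like `X | Y`) with `Union[X, Y]`."""
--     # If there is no '|' character in the annotation part, we just return it.
--     if OR not in s:
--         return s
--     s = s.replace(' ', '')
--
--     # Checking for brackets like `List[int | str]`.
--     if OPEN_BRACKET in s:
--         # Get any indices of COMMA or OR outside a braced expression.
--         outer_commas, outer_pipes = _outer_comma_and_pipe_indices(s)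
--         # commas outside bracket? e.g. dict[str | int, str]***,*** value[test]
--         if outer_commas:
--             return COMMA.join([_repl_union(i) for i in _sub_strings(s, outer_commas)])
--         # pipes outside bracket? e.g.: value | dict[str | int, list[int | str]]
--         if outer_pipes:
--             return f'Union{OPEN_BRACKET}{COMMA.join([_repl_union(i) for i in _sub_strings(s, outer_pipes)])}{CLOSE_BRACKET}'
--
--         # no outer commas/pipes, and `SomeType[str][bool]` is  invalid
--         # Replace inside brackets, e.g.: dict[str | int, str]
--         first_start_bracket = s.index(OPEN_BRACKET)
--         last_end_bracket = s.rindex(CLOSE_BRACKET)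
--         return (
--             f'{s[:first_start_bracket]}{OPEN_BRACKET}'
--             f'{_repl_union(s[first_start_bracket + 1:last_end_bracket])}'
--             f'{CLOSE_BRACKET}{s[last_end_bracket + 1:]}')
--
--     elif COMMA in s:  #  e.g. `int | str, float | None`
--         return COMMA.join([_repl_union(i) for i in s.split(COMMA)])
--
--     return f'Union{OPEN_BRACKET}{s.replace(OR, COMMA)}{CLOSE_BRACKET}'  # e.g. `int | str`
--
-- def _sub_strings(s: str, split_indices):
--     """Split a string on the specified indices, and return the split parts."""
--     prev = -1
--     for idx in split_indices:
--         yield s[prev+1:idx]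
--         prev = idx
--     yield s[prev+1:]
--
-- def _outer_comma_and_pipe_indices(s: str):
--     """Return any indices of ',' and '|' that are outside of braces."""
--     indices = {OR: [], COMMA: []}
--     brace_dict = {OPEN_BRACKET: 1, CLOSE_BRACKET: -1}
--     brace_count = 0
--
--     for i, char in enumerate(s):
--         if char in brace_dict:
--             brace_count += brace_dict[char]
--         elif not brace_count and char in indices:
--             indices[char].append(i)
--     return indices[COMMA], indices[OR]
-- ===== SOURCE B (Python) =====
-- def _repl_union(s: str):
--     """Replace PEP 604-style annotations (`X | Y`) with `Union[X, Y]`.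
--
--     One bottom-up left-to-right pass: a stack of per-bracket-level
--     accumulators assembles each bracket group when it closes, instead of
--     A's top-down recursive substring re-parsing."""
--     if '|' not in s:
--         return s
--     stack = []                  # saved (comma_parts, pipe_parts, buf) of enclosing levels
--     comma_parts, pipe_parts, buf = [], [], []
--     for ch in s.replace(' ', ''):
--         if ch == '[':
--             stack.append((comma_parts, pipe_parts, buf))
--             comma_parts, pipe_parts, buf = [], [], []
--         elif ch == ']' and stack:
--             inner = _close(comma_parts, pipe_parts, buf)
--             comma_parts, pipe_parts, buf = stack.pop()
--             buf.append('[' + inner + ']')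
--         elif ch == ',':
--             comma_parts.append(_join_pipes(pipe_parts, buf))
--             pipe_parts, buf = [], []
--         elif ch == '|':
--             pipe_parts.append(''.join(buf))
--             buf = []
--         else:
--             buf.append(ch)
--     return _close(comma_parts, pipe_parts, buf)
--
-- def _join_pipes(pipe_parts, buf):
--     """Render one comma-free segment from its collected pipe parts."""
--     if pipe_parts:
--         return 'Union[' + ','.join(pipe_parts + [''.join(buf)]) + ']'
--     return ''.join(buf)
--
-- def _close(comma_parts, pipe_parts, buf):
--     """Render a finished level: its comma parts joined with ','."""
--     return ','.join(comma_parts + [_join_pipes(pipe_parts, buf)])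
-- ===== Notes on version B (the rewrite author's own statement) =====
-- stated objective: alternative
-- what changed: B replaces A's top-down recursion (per level: scan for outer separator indices, slice substrings, recurse, plus index/rindex re-scans) by one bottom-up left-to-right pass over the whole string with an explicit stack of per-bracket-level accumulators that assembles each bracket group the moment it closes.
-- outside the precondition, e.g. on _repl_union(']a|b['): A returns ']a|b[]a|b[', B returns ''; on _repl_union('a[b|c][d]'): A returns 'a[Union[b,c][d]]', B returns 'a[Union[b,c]][d]'; on _repl_union('[a|b'): A raises ValueError, B returns 'Union[a,b]'
import Mathlib
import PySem

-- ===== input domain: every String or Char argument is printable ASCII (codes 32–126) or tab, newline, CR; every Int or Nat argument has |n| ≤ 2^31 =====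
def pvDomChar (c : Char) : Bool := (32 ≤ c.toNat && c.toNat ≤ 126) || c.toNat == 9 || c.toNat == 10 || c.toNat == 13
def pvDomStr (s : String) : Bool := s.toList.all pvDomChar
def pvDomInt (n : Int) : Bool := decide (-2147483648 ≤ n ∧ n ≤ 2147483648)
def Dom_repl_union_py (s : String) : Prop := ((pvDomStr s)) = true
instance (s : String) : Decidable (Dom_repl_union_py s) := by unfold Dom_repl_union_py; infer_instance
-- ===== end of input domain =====

-- B replaces A's top-down recursive substring re-parsing by one bottom-up left-to-right pass
-- with an explicit stack of per-bracket-level accumulators (objective: alternative algorithm).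

-- ===== PORT A =====
-- shared port of ','.join(...) (both sources use it) and of s.split(sep)
def pvICat (c : Char) : List (List Char) → List Char
  | [] => []
  | [a] => a
  | a :: rest => a ++ c :: pvICat c rest

def pvJoinC (xs : List (List Char)) : List Char := pvICat ',' xs

def pvSplitAll (sep : Char) : List Char → List (List Char)
  | [] => [[]]
  | c :: rest =>
    if c = sep then [] :: pvSplitAll sep rest
    else match pvSplitAll sep rest with
      | [] => [[c]]
      | h :: tl => (c :: h) :: tl

-- port of s.index(c) / s.rindex(c) (none = ValueError)
def pvFindIdx (c : Char) : List Char → Option Nat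
  | [] => none
  | a :: rest => if a = c then some 0 else (pvFindIdx c rest).map (· + 1)

def pvLastIdx (c : Char) : List Char → Option Nat
  | [] => none
  | a :: rest =>
    match pvLastIdx c rest with
    | some j => some (j + 1)
    | none => if a = c then some 0 else none

-- port of _outer_comma_and_pipe_indices: indices of ',' / '|' at brace depth 0
def pvOuterScan : List Char → Nat → Int → List Nat × List Nat
  | [], _, _ => ([], [])
  | c :: rest, i, d =>
    if c = '[' then pvOuterScan rest (i + 1) (d + 1)
    else if c = ']' then pvOuterScan rest (i + 1) (d - 1)
    else if d = 0 ∧ c = ',' then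
      ((i :: (pvOuterScan rest (i + 1) d).1), (pvOuterScan rest (i + 1) d).2)
    else if d = 0 ∧ c = '|' then
      ((pvOuterScan rest (i + 1) d).1, i :: (pvOuterScan rest (i + 1) d).2)
    else pvOuterScan rest (i + 1) d

-- port of _sub_strings: 'start' is Python's prev+1
def pvSubStrings (s : List Char) : Nat → List Nat → List (List Char)
  | start, [] => [s.drop start]
  | start, i :: rest => ((s.drop start).take (i - start)) :: pvSubStrings s (i + 1) rest

-- fuel = recursion depth bound; every recursive call is on a strictly shorter string, so
-- fuel = len+1 never runs out (the 0 branch is a totality guard only)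
def pvReplA : Nat → List Char → List Char
  | 0, _ => []
  | fuel + 1, l =>
    if '|' ∈ l then
      let t := l.filter (fun c => ¬ c = ' ')
      if '[' ∈ t then
        let oc := (pvOuterScan t 0 0).1
        let op := (pvOuterScan t 0 0).2
        if ¬ oc = [] then pvJoinC ((pvSubStrings t 0 oc).map (pvReplA fuel))
        else if ¬ op = [] then
          "Union[".toList ++ pvJoinC ((pvSubStrings t 0 op).map (pvReplA fuel)) ++ [']']
        else
          match pvFindIdx '[' t, pvLastIdx ']' t with
          | some i, some j =>
            t.take i ++ ['['] ++ pvReplA fuel ((t.drop (i + 1)).take (j - (i + 1))) ++ [']']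
              ++ t.drop (j + 1)
          | _, _ => []  -- Python A raises ValueError (rindex) here; outside Pre_
      else if ',' ∈ t then pvJoinC ((pvSplitAll ',' t).map (pvReplA fuel))
      else "Union[".toList ++ t.map (fun c => if c = '|' then ',' else c) ++ [']']
    else l

def repl_union_py (s : String) : String :=
  String.ofList (pvReplA (s.toList.length + 1) s.toList)

-- ===== PORT B =====
-- one bracket level's accumulators: (comma_parts, pipe_parts, buf)
abbrev pvFrame := List (List Char) × List (List Char) × List Char

def pvJoinPipes (pp : List (List Char)) (buf : List Char) : List Char :=
  match pp with
  | [] => buf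
  | _ => "Union[".toList ++ pvJoinC (pp ++ [buf]) ++ [']']

def pvCloseLv (cp pp : List (List Char)) (buf : List Char) : List Char :=
  pvJoinC (cp ++ [pvJoinPipes pp buf])

def pvStepB : (List pvFrame × pvFrame) → Char → (List pvFrame × pvFrame)
  | (stk, (cp, pp, buf)), c =>
    if c = '[' then ((cp, pp, buf) :: stk, ([], [], []))
    else if c = ']' then
      match stk with
      | (cp2, pp2, buf2) :: rest =>
        (rest, (cp2, pp2, buf2 ++ '[' :: (pvCloseLv cp pp buf ++ [']'])))
      | [] => (stk, (cp, pp, buf ++ [c]))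
    else if c = ',' then (stk, (cp ++ [pvJoinPipes pp buf], [], []))
    else if c = '|' then (stk, (cp, pp ++ [buf], []))
    else (stk, (cp, pp, buf ++ [c]))

def pvRunBcore (t : List Char) : List Char :=
  match t.foldl pvStepB ([], ([], [], [])) with
  | (_, (cp, pp, buf)) => pvCloseLv cp pp buf

def repl_union_py_alt (s : String) : String :=
  if '|' ∈ s.toList then
    String.ofList (pvRunBcore (s.toList.filter (fun c => ¬ c = ' ')))
  else s

-- ===== PRECONDITION & SPEC =====
-- bracket well-formedness: depth counter + a 'bracket group completed since the last
-- top-level separator at this level' flag (two sibling groups need a comma or pipe between them)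
def pvWf : List Char → Nat → Bool → Bool
  | [], d, _ => d == 0
  | c :: t, d, flag =>
    if c = '[' then !flag && pvWf t (d + 1) false
    else if c = ']' then
      match d with
      | 0 => false
      | d' + 1 => pvWf t d' true
    else if c = ',' ∨ c = '|' then pvWf t d false
    else pvWf t d flag

-- Pre_ excludes strings that (after A's space-strip) contain both a pipe and an opening square
-- bracket but whose bracket structure is ill-formed (unbalanced, or two sibling bracket groups at
-- the same level with no separator between them): no rewriting is specified for such annotations —
-- A splices between the first opening and last closing bracket across group boundaries (or raises
-- ValueError in rindex), B assembles the groups its stack actually closed; neither value is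
-- canonical, so these inputs are left out of the claim.
def Pre_repl_union_py (s : String) : Prop :=
  '|' ∉ s.toList ∨ '[' ∉ s.toList.filter (fun c => ¬ c = ' ') ∨
    pvWf (s.toList.filter (fun c => ¬ c = ' ')) 0 false = true
instance (s : String) : Decidable (Pre_repl_union_py s) := by
  unfold Pre_repl_union_py; infer_instance

def pvWitness_repl_union_py : String := "a|dict[b, c]"

def Spec_repl_union_py (s : String) (out : String) : Prop := out = repl_union_py_alt s
instance (s : String) (out : String) : Decidable (Spec_repl_union_py s out) := by
  unfold Spec_repl_union_py; infer_instance

-- ===== CLAIM (what is proved, stated in full; the proofs are below) =====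
def Claim_equal_repl_union_py : Prop :=
  ∀ (s : String), Dom_repl_union_py s → Pre_repl_union_py s →
    Spec_repl_union_py s (repl_union_py s)

-- ===== LEMMAS AND PROOFS =====

-- ---------- structural view of pvWf: well-formed bracket levels ----------
def pvPlain (p : List Char) : Prop := ∀ c ∈ p, c ≠ '[' ∧ c ≠ ']' ∧ c ≠ ',' ∧ c ≠ '|'

inductive PvLev : List Char → Bool → Prop
  | nil (f : Bool) : PvLev [] f
  | chr {c : Char} {t : List Char} {f : Bool} :
      c ≠ '[' → c ≠ ']' → c ≠ ',' → c ≠ '|' → PvLev t f → PvLev (c :: t) f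
  | sep {c : Char} {t : List Char} {f : Bool} :
      (c = ',' ∨ c = '|') → PvLev t false → PvLev (c :: t) f
  | grp {g y : List Char} : PvLev g false → PvLev y true → PvLev ('[' :: (g ++ ']' :: y)) false

inductive PvWfS : List Char → Nat → Bool → Prop
  | nil (f : Bool) : PvWfS [] 0 f
  | chr {c : Char} {t : List Char} {d : Nat} {f : Bool} :
      c ≠ '[' → c ≠ ']' → c ≠ ',' → c ≠ '|' → PvWfS t d f → PvWfS (c :: t) d f
  | sep {c : Char} {t : List Char} {d : Nat} {f : Bool} :
      (c = ',' ∨ c = '|') → PvWfS t d false → PvWfS (c :: t) d f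
  | opn {t : List Char} {d : Nat} : PvWfS t (d + 1) false → PvWfS ('[' :: t) d false
  | cls {t : List Char} {d : Nat} {f : Bool} : PvWfS t d true → PvWfS (']' :: t) (d + 1) f

theorem pvWf_sound : ∀ (t : List Char) (d : Nat) (flag : Bool),
    pvWf t d flag = true → PvWfS t d flag := by
  intro t
  induction t with
  | nil =>
    intro d flag h
    simp only [pvWf, beq_iff_eq] at h
    subst h
    exact PvWfS.nil flag
  | cons c rest ih =>
    intro d flag h
    simp only [pvWf] at h
    by_cases h1 : c = '['
    · subst h1
      rw [if_pos rfl] at h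
      simp only [Bool.and_eq_true, Bool.not_eq_true'] at h
      obtain ⟨hf, hw⟩ := h
      subst hf
      exact PvWfS.opn (ih _ _ hw)
    · rw [if_neg h1] at h
      by_cases h2 : c = ']'
      · subst h2
        rw [if_pos rfl] at h
        cases d with
        | zero => simp at h
        | succ d' => exact PvWfS.cls (ih _ _ h)
      · rw [if_neg h2] at h
        by_cases h3 : c = ',' ∨ c = '|'
        · rw [if_pos h3] at h
          exact PvWfS.sep h3 (ih _ _ h)
        · rw [if_neg h3] at h
          push_neg at h3
          exact PvWfS.chr h1 h2 h3.1 h3.2 (ih _ _ h)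

theorem pvWfS_close : ∀ (n : Nat) (t : List Char) (d : Nat) (f : Bool), t.length ≤ n →
    PvWfS t (d + 1) f → ∃ g r, t = g ++ ']' :: r ∧ PvLev g f ∧ PvWfS r d true := by
  intro n
  induction n with
  | zero =>
    intro t d f hlen h
    have ht : t = [] := List.eq_nil_of_length_eq_zero (Nat.le_zero.mp hlen)
    subst ht
    cases h
  | succ n ih =>
    intro t d f hlen h
    cases h with
    | chr h1 h2 h3 h4 h5 =>
      rename_i c t'
      obtain ⟨g, r, hts, hg, hr⟩ := ih t' d f (by simp at hlen; omega) h5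
      exact ⟨c :: g, r, by simp [hts], PvLev.chr h1 h2 h3 h4 hg, hr⟩
    | sep hc h5 =>
      rename_i c t'
      obtain ⟨g, r, hts, hg, hr⟩ := ih t' d false (by simp at hlen; omega) h5
      exact ⟨c :: g, r, by simp [hts], PvLev.sep hc hg, hr⟩
    | opn h5 =>
      rename_i t'
      obtain ⟨g1, r1, hts1, hg1, hr1⟩ := ih t' (d + 1) false (by simp at hlen; omega) h5
      have hlr1 : r1.length ≤ n := by
        have := congrArg List.length hts1
        simp at this hlen
        omega
      obtain ⟨g2, r2, hts2, hg2, hr2⟩ := ih r1 d true hlr1 hr1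
      refine ⟨'[' :: (g1 ++ ']' :: g2), r2, ?_, PvLev.grp hg1 hg2, hr2⟩
      simp [hts1, hts2]
    | cls h5 =>
      rename_i t'
      exact ⟨[], t', rfl, PvLev.nil f, h5⟩

theorem pvWfS_toLev : ∀ (n : Nat) (t : List Char) (f : Bool), t.length ≤ n →
    PvWfS t 0 f → PvLev t f := by
  intro n
  induction n with
  | zero =>
    intro t f hlen h
    have ht : t = [] := List.eq_nil_of_length_eq_zero (Nat.le_zero.mp hlen)
    subst ht
    cases h
    exact PvLev.nil f
  | succ n ih =>
    intro t f hlen h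
    cases h with
    | nil => exact PvLev.nil f
    | chr h1 h2 h3 h4 h5 =>
      exact PvLev.chr h1 h2 h3 h4 (ih _ _ (by simp at hlen; omega) h5)
    | sep hc h5 =>
      exact PvLev.sep hc (ih _ _ (by simp at hlen; omega) h5)
    | opn h5 =>
      rename_i t'
      obtain ⟨g, r, hts, hg, hr⟩ := pvWfS_close t'.length t' 0 false le_rfl h5
      have hlr : r.length ≤ n := by
        have := congrArg List.length hts
        simp at this hlen
        omega
      have hry : PvLev r true := ih r true hlr hr
      rw [hts]
      exact PvLev.grp hg hry

-- ---------- items and segment decomposition ----------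
def pvItemV (p : List Char) : Prop :=
  pvPlain p ∨ ∃ x g y, p = x ++ '[' :: (g ++ ']' :: y) ∧ pvPlain x ∧ PvLev g false ∧ pvPlain y

theorem pvICat_cons {c : Char} {a : List Char} {l : List (List Char)} (h : l ≠ []) :
    pvICat c (a :: l) = a ++ c :: pvICat c l := by
  cases l with
  | nil => exact absurd rfl h
  | cons b tl => rfl

theorem pvPlain_nil : pvPlain [] := by
  intro c hc; cases hc

theorem pvPlain_cons {c : Char} {p : List Char} (h1 : c ≠ '[') (h2 : c ≠ ']') (h3 : c ≠ ',')
    (h4 : c ≠ '|') (hp : pvPlain p) : pvPlain (c :: p) := by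
  intro x hx
  rcases List.mem_cons.mp hx with rfl | hx
  · exact ⟨h1, h2, h3, h4⟩
  · exact hp x hx

theorem pvItemV_cons {c : Char} {p : List Char} (h1 : c ≠ '[') (h2 : c ≠ ']') (h3 : c ≠ ',')
    (h4 : c ≠ '|') (hp : pvItemV p) : pvItemV (c :: p) := by
  rcases hp with hp | ⟨x, g, y, rfl, hx, hg, hy⟩
  · exact Or.inl (pvPlain_cons h1 h2 h3 h4 hp)
  · exact Or.inr ⟨c :: x, g, y, by simp, pvPlain_cons h1 h2 h3 h4 hx, hg, hy⟩

theorem pvLev_true_head : ∀ (t : List Char) (f : Bool), PvLev t f → f = true →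
    ∃ y, pvPlain y ∧ (t = y ∨ ∃ c r, (c = ',' ∨ c = '|') ∧ t = y ++ c :: r ∧ PvLev r false) := by
  intro t f h
  induction h with
  | nil f => exact fun _ => ⟨[], pvPlain_nil, Or.inl rfl⟩
  | chr h1 h2 h3 h4 h5 ih =>
    intro hf
    obtain ⟨y, hy, hca⟩ := ih hf
    rcases hca with heq | ⟨c', r, hc', hts, hr⟩
    · exact ⟨_ :: y, pvPlain_cons h1 h2 h3 h4 hy, Or.inl (by simp [heq])⟩
    · exact ⟨_ :: y, pvPlain_cons h1 h2 h3 h4 hy,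
        Or.inr ⟨c', r, hc', by simp [hts], hr⟩⟩
  | sep hc h5 ih =>
    intro _
    exact ⟨[], pvPlain_nil, Or.inr ⟨_, _, hc, by simp, h5⟩⟩
  | grp hg hy ihg ihy => exact fun hf => absurd hf (by simp)

theorem pvLev_first_item : ∀ (t : List Char) (f : Bool), PvLev t f →
    ∃ p, pvItemV p ∧ (t = p ∨ ∃ c r, (c = ',' ∨ c = '|') ∧ t = p ++ c :: r ∧ PvLev r false) := by
  intro t f h
  induction h with
  | nil f => exact ⟨[], Or.inl pvPlain_nil, Or.inl rfl⟩
  | chr h1 h2 h3 h4 h5 ih =>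
    obtain ⟨p, hp, hca⟩ := ih
    rcases hca with heq | ⟨c', r, hc', hts, hr⟩
    · exact ⟨_ :: p, pvItemV_cons h1 h2 h3 h4 hp, Or.inl (by simp [heq])⟩
    · exact ⟨_ :: p, pvItemV_cons h1 h2 h3 h4 hp,
        Or.inr ⟨c', r, hc', by simp [hts], hr⟩⟩
  | sep hc h5 ih =>
    exact ⟨[], Or.inl pvPlain_nil, Or.inr ⟨_, _, hc, by simp, h5⟩⟩
  | grp hg hy ihg ihy =>
    rename_i g y
    obtain ⟨y0, hy0, hca⟩ := pvLev_true_head y true hy rfl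
    rcases hca with heq | ⟨c', r, hc', hts, hr⟩
    · exact ⟨'[' :: (g ++ ']' :: y0), Or.inr ⟨[], g, y0, by simp, pvPlain_nil, hg, hy0⟩,
        Or.inl (by simp [heq])⟩
    · refine ⟨'[' :: (g ++ ']' :: y0), Or.inr ⟨[], g, y0, by simp, pvPlain_nil, hg, hy0⟩,
        Or.inr ⟨c', r, hc', ?_, hr⟩⟩
      simp [hts]

theorem pvLev_csegs : ∀ (n : Nat) (t : List Char) (f : Bool), t.length ≤ n → PvLev t f →
    ∃ css : List (List (List Char)), css ≠ [] ∧
      (∀ items ∈ css, items ≠ [] ∧ ∀ p ∈ items, pvItemV p) ∧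
      t = pvICat ',' (css.map (pvICat '|')) := by
  intro n
  induction n with
  | zero =>
    intro t f hlen h
    have ht : t = [] := List.eq_nil_of_length_eq_zero (Nat.le_zero.mp hlen)
    subst ht
    refine ⟨[[[]]], by simp, ?_, by simp [pvICat]⟩
    intro items hi
    simp at hi
    subst hi
    exact ⟨by simp, by simp [pvItemV, pvPlain_nil]⟩
  | succ n ih =>
    intro t f hlen h
    obtain ⟨p, hp, hca⟩ := pvLev_first_item t f h
    rcases hca with heq | ⟨c, r, hc, hts, hr⟩
    · refine ⟨[[p]], by simp, ?_, by simpa [pvICat] using heq⟩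
      intro items hi
      simp at hi
      subst hi
      exact ⟨by simp, by simpa using hp⟩
    · have hlr : r.length ≤ n := by
        have := congrArg List.length hts
        simp at this hlen
        omega
      obtain ⟨css_r, hne, hprops, hrec⟩ := ih r false hlr hr
      obtain ⟨items1, css', rfl⟩ : ∃ a l, css_r = a :: l := by
        cases css_r with
        | nil => exact absurd rfl hne
        | cons a l => exact ⟨a, l, rfl⟩
      rcases hc with rfl | rfl
      · refine ⟨[p] :: items1 :: css', by simp, ?_, ?_⟩
        · intro items hi
          rcases List.mem_cons.mp hi with rfl | hi
          · exact ⟨by simp, by simpa using hp⟩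
          · exact hprops items hi
        · have h2 : pvICat ',' (List.map (pvICat '|') ([p] :: items1 :: css')) =
              pvICat '|' [p] ++ ',' :: pvICat ',' (List.map (pvICat '|') (items1 :: css')) := by
            rw [List.map_cons]
            exact pvICat_cons (by simp)
          rw [hts, hrec, h2]
          simp [pvICat]
      · have hitems1 : items1 ≠ [] := (hprops items1 (by simp)).1
        refine ⟨(p :: items1) :: css', by simp, ?_, ?_⟩
        · intro items hi
          rcases List.mem_cons.mp hi with rfl | hi
          · refine ⟨by simp, ?_⟩
            intro q hq
            rcases List.mem_cons.mp hq with rfl | hq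
            · exact hp
            · exact (hprops items1 (by simp)).2 q hq
          · exact hprops items (by simp [hi])
        · have e1 : pvICat '|' (p :: items1) = p ++ '|' :: pvICat '|' items1 :=
            pvICat_cons hitems1
          cases css' with
          | nil =>
            rw [hts, hrec]
            simp [pvICat, e1]
          | cons a l =>
            have h2 : pvICat ',' (List.map (pvICat '|') ((p :: items1) :: a :: l)) =
                pvICat '|' (p :: items1) ++ ',' :: pvICat ',' (List.map (pvICat '|') (a :: l)) := by
              rw [List.map_cons]
              exact pvICat_cons (by simp)
            have h3 : pvICat ',' (List.map (pvICat '|') (items1 :: a :: l)) =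
                pvICat '|' items1 ++ ',' :: pvICat ',' (List.map (pvICat '|') (a :: l)) := by
              rw [List.map_cons]
              exact pvICat_cons (by simp)
            rw [hts, hrec, h3, h2, e1]
            simp

-- ---------- the machine: run lemmas ----------
def pvRunsTo (p r : List Char) : Prop :=
  ∀ cp pp buf, List.foldl pvStepB ([], (cp, pp, buf)) p = ([], (cp, pp, buf ++ r))

theorem pvStep_plain {c : Char} (h1 : c ≠ '[') (h2 : c ≠ ']') (h3 : c ≠ ',') (h4 : c ≠ '|')
    (stk : List pvFrame) (cp pp : List (List Char)) (buf : List Char) :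
    pvStepB (stk, (cp, pp, buf)) c = (stk, (cp, pp, buf ++ [c])) := by
  simp [pvStepB, h1, h2, h3, h4]

theorem pvRunsTo_plain : ∀ (p : List Char), pvPlain p → pvRunsTo p p := by
  intro p
  induction p with
  | nil => exact fun _ cp pp buf => by simp
  | cons c rest ih =>
    intro hp cp pp buf
    have hc := hp c (by simp)
    have hrest : pvPlain rest := fun x hx => hp x (List.mem_cons_of_mem _ hx)
    simp only [List.foldl_cons]
    rw [pvStep_plain hc.1 hc.2.1 hc.2.2.1 hc.2.2.2]
    rw [ih hrest cp pp (buf ++ [c])]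
    simp

theorem pvRunsTo_nb : ∀ (p : List Char), '[' ∉ p → ',' ∉ p → '|' ∉ p → pvRunsTo p p := by
  intro p
  induction p with
  | nil => exact fun _ _ _ cp pp buf => by simp
  | cons c rest ih =>
    intro h1 h2 h3 cp pp buf
    have hc1 : c ≠ '[' := fun e => h1 (by simp [e])
    have hc3 : c ≠ ',' := fun e => h2 (by simp [e])
    have hc4 : c ≠ '|' := fun e => h3 (by simp [e])
    have h1' : '[' ∉ rest := fun hx => h1 (List.mem_cons_of_mem _ hx)
    have h2' : ',' ∉ rest := fun hx => h2 (List.mem_cons_of_mem _ hx)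
    have h3' : '|' ∉ rest := fun hx => h3 (List.mem_cons_of_mem _ hx)
    by_cases hc2 : c = ']'
    · subst hc2
      simp only [List.foldl_cons]
      have hstep : pvStepB ([], (cp, pp, buf)) ']' = ([], (cp, pp, buf ++ [']'])) := by
        simp [pvStepB]
      rw [hstep, ih h1' h2' h3' cp pp (buf ++ [']'])]
      simp
    · simp only [List.foldl_cons]
      rw [pvStep_plain hc1 hc2 hc3 hc4, ih h1' h2' h3' cp pp (buf ++ [c])]
      simp

theorem pvStack_irrel : ∀ (g : List Char) (f : Bool), PvLev g f →
    ∀ fr : pvFrame, ∃ fr', ∀ stk, List.foldl pvStepB (stk, fr) g = (stk, fr') := by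
  intro g f h
  induction h with
  | nil f => exact fun fr => ⟨fr, fun stk => by simp⟩
  | chr h1 h2 h3 h4 h5 ih =>
    intro fr
    obtain ⟨cp, pp, buf⟩ := fr
    obtain ⟨fr2, hfr2⟩ := ih (cp, pp, buf ++ [_])
    refine ⟨fr2, fun stk => ?_⟩
    simp only [List.foldl_cons]
    rw [pvStep_plain h1 h2 h3 h4]
    exact hfr2 stk
  | sep hc h5 ih =>
    intro fr
    obtain ⟨cp, pp, buf⟩ := fr
    rcases hc with rfl | rfl
    · obtain ⟨fr2, hfr2⟩ := ih (cp ++ [pvJoinPipes pp buf], [], [])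
      refine ⟨fr2, fun stk => ?_⟩
      simp only [List.foldl_cons]
      have hstep : pvStepB (stk, (cp, pp, buf)) ',' =
          (stk, (cp ++ [pvJoinPipes pp buf], [], [])) := by simp [pvStepB]
      rw [hstep]
      exact hfr2 stk
    · obtain ⟨fr2, hfr2⟩ := ih (cp, pp ++ [buf], [])
      refine ⟨fr2, fun stk => ?_⟩
      simp only [List.foldl_cons]
      have hstep : pvStepB (stk, (cp, pp, buf)) '|' = (stk, (cp, pp ++ [buf], [])) := by
        simp [pvStepB]
      rw [hstep]
      exact hfr2 stk
  | grp hg hy ihg ihy =>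
    intro fr
    obtain ⟨cp, pp, buf⟩ := fr
    obtain ⟨frg, hfrg⟩ := ihg ([], [], [])
    obtain ⟨gcp, gpp, gbuf⟩ := frg
    obtain ⟨fr3, hfr3⟩ := ihy (cp, pp, buf ++ '[' :: (pvCloseLv gcp gpp gbuf ++ [']']))
    refine ⟨fr3, fun stk => ?_⟩
    simp only [List.foldl_cons, List.foldl_append]
    have hopen : pvStepB (stk, (cp, pp, buf)) '[' = ((cp, pp, buf) :: stk, ([], [], [])) := by
      simp [pvStepB]
    rw [hopen, hfrg ((cp, pp, buf) :: stk)]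
    have hclose : pvStepB ((cp, pp, buf) :: stk, (gcp, gpp, gbuf)) ']' =
        (stk, (cp, pp, buf ++ '[' :: (pvCloseLv gcp gpp gbuf ++ [']']))) := by
      simp [pvStepB]
    rw [hclose]
    exact hfr3 stk

theorem pvRunsTo_group : ∀ (x g y : List Char), pvPlain x → PvLev g false → pvPlain y →
    pvRunsTo (x ++ '[' :: (g ++ ']' :: y)) (x ++ '[' :: (pvRunBcore g ++ ']' :: y)) := by
  intro x g y hx hg hy cp pp buf
  obtain ⟨frg, hfrg⟩ := pvStack_irrel g false hg ([], [], [])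
  obtain ⟨gcp, gpp, gbuf⟩ := frg
  have hcore : pvRunBcore g = pvCloseLv gcp gpp gbuf := by
    unfold pvRunBcore
    rw [hfrg []]
  simp only [List.foldl_append, List.foldl_cons]
  rw [pvRunsTo_plain x hx cp pp buf]
  have hopen : pvStepB ([], (cp, pp, buf ++ x)) '[' =
      ([(cp, pp, buf ++ x)], ([], [], [])) := by simp [pvStepB]
  rw [hopen, hfrg [(cp, pp, buf ++ x)]]
  have hclose : pvStepB ([(cp, pp, buf ++ x)], (gcp, gpp, gbuf)) ']' =
      ([], (cp, pp, (buf ++ x) ++ '[' :: (pvCloseLv gcp gpp gbuf ++ [']']))) := by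
    simp [pvStepB]
  rw [hclose, pvRunsTo_plain y hy cp pp _]
  rw [hcore]
  simp

def pvItemVR (p r : List Char) : Prop :=
  (pvPlain p ∧ r = p) ∨ ∃ x g y, p = x ++ '[' :: (g ++ ']' :: y) ∧ pvPlain x ∧ PvLev g false ∧
    pvPlain y ∧ r = x ++ '[' :: (pvRunBcore g ++ ']' :: y)

theorem pvItemV_run : ∀ (p : List Char), pvItemV p → ∃ r, pvRunsTo p r ∧ pvItemVR p r := by
  intro p hp
  rcases hp with hp | ⟨x, g, y, rfl, hx, hg, hy⟩
  · exact ⟨p, pvRunsTo_plain p hp, Or.inl ⟨hp, rfl⟩⟩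
  · exact ⟨x ++ '[' :: (pvRunBcore g ++ ']' :: y), pvRunsTo_group x g y hx hg hy,
      Or.inr ⟨x, g, y, rfl, hx, hg, hy, rfl⟩⟩

def segRender : List (List Char) → List Char
  | [r] => r
  | rs => "Union[".toList ++ pvICat ',' rs ++ [']']

theorem pvSegAux : ∀ (prs : List (List Char × List Char)), prs ≠ [] →
    (∀ pr ∈ prs, pvRunsTo pr.1 pr.2) → ∀ cp pp,
    ∃ pp' bufl, List.foldl pvStepB ([], (cp, pp, [])) (pvICat '|' (prs.map Prod.fst)) =
        ([], (cp, pp ++ pp', bufl)) ∧ pp' ++ [bufl] = prs.map Prod.snd := by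
  intro prs
  induction prs with
  | nil => exact fun h => absurd rfl h
  | cons pr rest ih =>
    intro _ hruns cp pp
    cases rest with
    | nil =>
      refine ⟨[], pr.2, ?_, by simp⟩
      have := hruns pr (by simp) cp pp []
      simpa [pvICat] using this
    | cons q rest' =>
      have hicat : pvICat '|' ((pr :: q :: rest').map Prod.fst) =
          pr.1 ++ '|' :: pvICat '|' ((q :: rest').map Prod.fst) := by
        rw [List.map_cons]
        exact pvICat_cons (by simp)
      rw [hicat]
      simp only [List.foldl_append, List.foldl_cons]
      have h1 := hruns pr (by simp) cp pp []
      simp only [List.nil_append] at h1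
      rw [h1]
      have hstep : pvStepB ([], (cp, pp, pr.2)) '|' = ([], (cp, pp ++ [pr.2], [])) := by
        simp [pvStepB]
      rw [hstep]
      obtain ⟨pp', bufl, heq, hsnd⟩ := ih (by simp)
        (fun x hx => hruns x (List.mem_cons_of_mem _ hx)) cp (pp ++ [pr.2])
      refine ⟨pr.2 :: pp', bufl, ?_, by simp [← hsnd]⟩
      rw [heq]
      simp

theorem pvJoinPipes_seg {pp' : List (List Char)} {bufl : List Char} {rs : List (List Char)}
    (h : pp' ++ [bufl] = rs) : pvJoinPipes pp' bufl = segRender rs := by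
  subst h
  cases pp' with
  | nil => simp [pvJoinPipes, segRender]
  | cons a l =>
    cases l with
    | nil => simp [pvJoinPipes, segRender, pvJoinC]
    | cons b m => simp [pvJoinPipes, segRender, pvJoinC]

theorem pvMachineRun : ∀ (cssr : List (List (List Char × List Char))), cssr ≠ [] →
    (∀ prs ∈ cssr, prs ≠ [] ∧ ∀ pr ∈ prs, pvRunsTo pr.1 pr.2) → ∀ cp,
    pvCloseLv
        (List.foldl pvStepB ([], (cp, [], []))
          (pvICat ',' (cssr.map (fun prs => pvICat '|' (prs.map Prod.fst))))).2.1
        (List.foldl pvStepB ([], (cp, [], []))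
          (pvICat ',' (cssr.map (fun prs => pvICat '|' (prs.map Prod.fst))))).2.2.1
        (List.foldl pvStepB ([], (cp, [], []))
          (pvICat ',' (cssr.map (fun prs => pvICat '|' (prs.map Prod.fst))))).2.2.2 =
      pvJoinC (cp ++ cssr.map (fun prs => segRender (prs.map Prod.snd))) := by
  intro cssr
  induction cssr with
  | nil => exact fun h => absurd rfl h
  | cons prs rest ih =>
    intro _ hprops cp
    have hprs := hprops prs (by simp)
    obtain ⟨pp', bufl, heq, hsnd⟩ := pvSegAux prs hprs.1 hprs.2 cp []
    simp only [List.nil_append] at heq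
    cases rest with
    | nil =>
      simp only [List.map_cons, List.map_nil, pvICat]
      rw [heq]
      simp only [pvCloseLv]
      rw [pvJoinPipes_seg hsnd]
    | cons b rest' =>
      have hicat : pvICat ',' ((prs :: b :: rest').map
            (fun prs => pvICat '|' (prs.map Prod.fst))) =
          pvICat '|' (prs.map Prod.fst) ++ ',' ::
            pvICat ',' ((b :: rest').map (fun prs => pvICat '|' (prs.map Prod.fst))) := by
        rw [List.map_cons]
        exact pvICat_cons (by simp)
      rw [hicat]
      simp only [List.foldl_append, List.foldl_cons]
      rw [heq]
      have hstep : pvStepB ([], (cp, pp', bufl)) ',' =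
          ([], (cp ++ [pvJoinPipes pp' bufl], [], [])) := by simp [pvStepB]
      rw [hstep, pvJoinPipes_seg hsnd]
      have hih := ih (by simp) (fun x hx => hprops x (List.mem_cons_of_mem _ hx))
        (cp ++ [segRender (prs.map Prod.snd)])
      rw [hih]
      simp

theorem pvRunBcore_csegs : ∀ (cssr : List (List (List Char × List Char))), cssr ≠ [] →
    (∀ prs ∈ cssr, prs ≠ [] ∧ ∀ pr ∈ prs, pvRunsTo pr.1 pr.2) →
    pvRunBcore (pvICat ',' (cssr.map (fun prs => pvICat '|' (prs.map Prod.fst)))) =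
      pvJoinC (cssr.map (fun prs => segRender (prs.map Prod.snd))) := by
  intro cssr hne hprops
  unfold pvRunBcore
  have := pvMachineRun cssr hne hprops []
  simpa using this

theorem pvChoose_items : ∀ (items : List (List Char)), (∀ p ∈ items, pvItemV p) →
    ∃ prs : List (List Char × List Char), prs.map Prod.fst = items ∧
      ∀ pr ∈ prs, pvRunsTo pr.1 pr.2 ∧ pvItemVR pr.1 pr.2 := by
  intro items
  induction items with
  | nil => exact fun _ => ⟨[], rfl, by simp⟩
  | cons p rest ih =>
    intro hall
    obtain ⟨prs, hfst, hprops⟩ := ih (fun q hq => hall q (List.mem_cons_of_mem _ hq))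
    obtain ⟨r, hr1, hr2⟩ := pvItemV_run p (hall p (by simp))
    refine ⟨(p, r) :: prs, by simp [hfst], ?_⟩
    intro pr hpr
    rcases List.mem_cons.mp hpr with rfl | hpr
    · exact ⟨hr1, hr2⟩
    · exact hprops pr hpr

theorem pvChoose_css : ∀ (css : List (List (List Char))),
    (∀ items ∈ css, ∀ p ∈ items, pvItemV p) →
    ∃ cssr : List (List (List Char × List Char)),
      cssr.map (fun prs => prs.map Prod.fst) = css ∧
      ∀ prs ∈ cssr, ∀ pr ∈ prs, pvRunsTo pr.1 pr.2 ∧ pvItemVR pr.1 pr.2 := by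
  intro css
  induction css with
  | nil => exact fun _ => ⟨[], rfl, by simp⟩
  | cons items rest ih =>
    intro hall
    obtain ⟨cssr, hfst, hprops⟩ := ih (fun i hi => hall i (List.mem_cons_of_mem _ hi))
    obtain ⟨prs, hf, hp⟩ := pvChoose_items items (hall items (by simp))
    refine ⟨prs :: cssr, by simp [hf, hfst], ?_⟩
    intro prs' hprs'
    rcases List.mem_cons.mp hprs' with rfl | hprs'
    · exact hp
    · exact hprops prs' hprs' 

-- ---------- A-side: outer index scan vs depth-0 splitting ----------
def pvConsH (pre : List Char) : List (List Char) → List (List Char)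
  | [] => [pre]
  | h :: tl => (pre ++ h) :: tl

def pvSplitD (sep : Char) : List Char → Int → List (List Char)
  | [], _ => [[]]
  | c :: rest, d =>
    let d' := if c = '[' then d + 1 else if c = ']' then d - 1 else d
    if c = sep ∧ d' = 0 then [] :: pvSplitD sep rest d'
    else pvConsH [c] (pvSplitD sep rest d')

def pvIdxsD (sep : Char) : List Char → Nat → Int → List Nat
  | [], _, _ => []
  | c :: rest, k, d =>
    let d' := if c = '[' then d + 1 else if c = ']' then d - 1 else d
    if c = sep ∧ d' = 0 then k :: pvIdxsD sep rest (k + 1) d'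
    else pvIdxsD sep rest (k + 1) d'

theorem pvConsH_append (a b : List Char) (l : List (List Char)) :
    pvConsH a (pvConsH b l) = pvConsH (a ++ b) l := by
  cases l <;> simp [pvConsH]

theorem pvSplitD_ne_nil (sep : Char) (l : List Char) (d : Int) : pvSplitD sep l d ≠ [] := by
  cases l with
  | nil => simp [pvSplitD]
  | cons c rest =>
    simp only [pvSplitD]
    by_cases h : c = sep ∧ (if c = '[' then d + 1 else if c = ']' then d - 1 else d) = 0
    · obtain ⟨hc, hd⟩ := h
      subst hc
      simp [hd]
    · simp only [if_neg h]
      generalize pvSplitD sep rest _ = r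
      cases r <;> simp [pvConsH]

theorem pvConsH_nil_splitD (sep : Char) (l : List Char) (d : Int) :
    pvConsH [] (pvSplitD sep l d) = pvSplitD sep l d := by
  have h := pvSplitD_ne_nil sep l d
  cases hr : pvSplitD sep l d with
  | nil => exact absurd hr h
  | cons a b => simp [pvConsH]

theorem pvOuterScan_eq (rest : List Char) : ∀ (k : Nat) (d : Int),
    pvOuterScan rest k d = (pvIdxsD ',' rest k d, pvIdxsD '|' rest k d) := by
  induction rest with
  | nil => intro k d; simp [pvOuterScan, pvIdxsD]
  | cons c rest ih =>
    intro k d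
    by_cases h1 : c = '['
    · subst h1; simp [pvOuterScan, pvIdxsD, ih]
    · by_cases h2 : c = ']'
      · subst h2; simp [pvOuterScan, pvIdxsD, ih, h1]
      · by_cases h3 : d = 0 ∧ c = ','
        · obtain ⟨hd, hc⟩ := h3
          subst hc hd
          simp [pvOuterScan, pvIdxsD, ih, h1, h2]
        · by_cases h4 : d = 0 ∧ c = '|'
          · obtain ⟨hd, hc⟩ := h4
            subst hc hd
            simp [pvOuterScan, pvIdxsD, ih, h1, h2]
          · simp [pvOuterScan, pvIdxsD, ih, h1, h2, h3, h4]
            exact ⟨fun hc hd => h3 ⟨hd, hc⟩, fun hc hd => h4 ⟨hd, hc⟩⟩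

theorem pvIdxsD_ge (sep : Char) (rest : List Char) : ∀ (k : Nat) (d : Int),
    ∀ i ∈ pvIdxsD sep rest k d, k ≤ i := by
  induction rest with
  | nil => intro k d i hi; simp [pvIdxsD] at hi
  | cons c rest ih =>
    intro k d i hi
    simp only [pvIdxsD] at hi
    by_cases h : c = sep ∧ (if c = '[' then d + 1 else if c = ']' then d - 1 else d) = 0
    · rw [if_pos h] at hi
      rcases List.mem_cons.mp hi with rfl | hi
      · exact le_refl _
      · exact Nat.le_of_succ_le (ih (k + 1) _ i hi)
    · rw [if_neg h] at hi
      exact Nat.le_of_succ_le (ih (k + 1) _ i hi)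

theorem pvSubStrings_eq_splitD (sep : Char) (rest : List Char) : ∀ (pre : List Char) (d : Int),
    pvSubStrings (pre ++ rest) pre.length (pvIdxsD sep rest pre.length d) =
      pvSplitD sep rest d := by
  induction rest with
  | nil => intro pre d; simp [pvIdxsD, pvSubStrings, pvSplitD]
  | cons c rest ih =>
    intro pre d
    have happ : pre ++ c :: rest = (pre ++ [c]) ++ rest := by simp
    have hlen : (pre ++ [c]).length = pre.length + 1 := by simp
    have hdrop2 : (pre ++ c :: rest).drop (pre.length + 1) = rest := by
      rw [happ, ← hlen, List.drop_left]
    have hdrop : (pre ++ c :: rest).drop pre.length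
        = c :: (pre ++ c :: rest).drop (pre.length + 1) := by
      rw [hdrop2, List.drop_left]
    have hih : pvSubStrings (pre ++ c :: rest) (pre.length + 1)
        (pvIdxsD sep rest (pre.length + 1)
          (if c = '[' then d + 1 else if c = ']' then d - 1 else d)) =
        pvSplitD sep rest (if c = '[' then d + 1 else if c = ']' then d - 1 else d) := by
      rw [happ, ← hlen]
      exact ih (pre ++ [c]) _
    have hshift : ∀ (idxs : List Nat), (∀ i ∈ idxs, pre.length + 1 ≤ i) →
        pvSubStrings (pre ++ c :: rest) pre.length idxs
          = pvConsH [c] (pvSubStrings (pre ++ c :: rest) (pre.length + 1) idxs) := by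
      intro idxs hge
      cases idxs with
      | nil => simp [pvSubStrings, pvConsH, hdrop]
      | cons i rest2 =>
        have hik : pre.length + 1 ≤ i := hge i (by simp)
        simp only [pvSubStrings, pvConsH]
        rw [hdrop]
        congr 1
        have h1 : i - pre.length = (i - (pre.length + 1)) + 1 := by omega
        rw [h1]
        simp
    simp only [pvIdxsD, pvSplitD]
    by_cases h : c = sep ∧ (if c = '[' then d + 1 else if c = ']' then d - 1 else d) = 0
    · rw [if_pos h, if_pos h]
      simp only [pvSubStrings]
      simp [hih]
    · rw [if_neg h, if_neg h]
      rw [hshift _ (pvIdxsD_ge sep rest (pre.length + 1) _)]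
      rw [hih]

theorem pvSubStrings_length (s : List Char) : ∀ (k : Nat) (idxs : List Nat),
    (pvSubStrings s k idxs).length = idxs.length + 1 := by
  intro k idxs
  induction idxs generalizing k with
  | nil => simp [pvSubStrings]
  | cons i rest ih => simp [pvSubStrings, ih]

theorem pvSplitD_cons_nosplit {sep c : Char} {d : Int} (hc1 : c ≠ '[') (hc2 : c ≠ ']')
    (h : ¬(c = sep ∧ d = 0)) (w : List Char) :
    pvSplitD sep (c :: w) d = pvConsH [c] (pvSplitD sep w d) := by
  simp only [pvSplitD]
  rw [if_neg hc1, if_neg hc2, if_neg h]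

theorem pvSplitD_cons_open {sep : Char} {d : Int} (hs : '[' ≠ sep) (w : List Char) :
    pvSplitD sep ('[' :: w) d = pvConsH ['['] (pvSplitD sep w (d + 1)) := by
  simp [pvSplitD, hs]

theorem pvSplitD_cons_close {sep : Char} {d : Int} (hs : ']' ≠ sep) (w : List Char) :
    pvSplitD sep (']' :: w) d = pvConsH [']'] (pvSplitD sep w (d - 1)) := by
  simp [pvSplitD, hs]

theorem pvSplitD_cons_split {sep : Char} (hc1 : sep ≠ '[') (hc2 : sep ≠ ']') (w : List Char) :
    pvSplitD sep (sep :: w) 0 = [] :: pvSplitD sep w 0 := by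
  simp [pvSplitD, hc1, hc2]

theorem pvLastIdx_none {c : Char} : ∀ {y : List Char}, c ∉ y → pvLastIdx c y = none := by
  intro y
  induction y with
  | nil => intro _; rfl
  | cons d y' ih =>
    intro h
    have hd : d ≠ c := fun e => h (by simp [e])
    have h' : c ∉ y' := fun hx => h (List.mem_cons_of_mem _ hx)
    simp [pvLastIdx, ih h', hd]

theorem pvSplitD_plain : ∀ (p : List Char) (sep : Char) (r : List Char) (d : Int),
    (∀ c ∈ p, c ≠ sep ∧ c ≠ '[' ∧ c ≠ ']') →
    pvSplitD sep (p ++ r) d = pvConsH p (pvSplitD sep r d) := by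
  intro p
  induction p with
  | nil =>
    intro sep r d _
    simp [pvConsH_nil_splitD]
  | cons c p' ih =>
    intro sep r d h
    have hc := h c (by simp)
    simp only [List.cons_append]
    rw [pvSplitD_cons_nosplit hc.2.1 hc.2.2 (fun hand => hc.1 hand.1)]
    rw [ih sep r d (fun x hx => h x (List.mem_cons_of_mem _ hx)), pvConsH_append]
    simp

theorem pvSplitD_deep : ∀ (g : List Char) (f : Bool), PvLev g f →
    ∀ (sep : Char) (r : List Char) (d : Int), sep = ',' ∨ sep = '|' → 1 ≤ d →
    pvSplitD sep (g ++ r) d = pvConsH g (pvSplitD sep r d) := by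
  intro g f h
  induction h with
  | nil f =>
    intro sep r d hsep hd
    simp [pvConsH_nil_splitD]
  | chr h1 h2 h3 h4 h5 ih =>
    rename_i c t f
    intro sep r d hsep hd
    have hcs : c ≠ sep := by rcases hsep with rfl | rfl; exacts [h3, h4]
    simp only [List.cons_append]
    rw [pvSplitD_cons_nosplit h1 h2 (fun hand => hcs hand.1)]
    rw [ih sep r d hsep hd, pvConsH_append]
    simp
  | sep hc h5 ih =>
    rename_i c t f
    intro sep r d hsep hd
    have h1 : c ≠ '[' := by rcases hc with rfl | rfl <;> decide
    have h2 : c ≠ ']' := by rcases hc with rfl | rfl <;> decide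
    simp only [List.cons_append]
    rw [pvSplitD_cons_nosplit h1 h2 (fun hand => by omega)]
    rw [ih sep r d hsep hd, pvConsH_append]
    simp
  | grp hg hy ihg ihy =>
    rename_i g' y
    intro sep r d hsep hd
    have hso : '[' ≠ sep := by rcases hsep with rfl | rfl <;> decide
    have hsc : ']' ≠ sep := by rcases hsep with rfl | rfl <;> decide
    have hassoc : ('[' :: (g' ++ ']' :: y)) ++ r = '[' :: (g' ++ (']' :: (y ++ r))) := by simp
    rw [hassoc, pvSplitD_cons_open hso]
    rw [ihg sep (']' :: (y ++ r)) (d + 1) hsep (by omega)]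
    rw [pvSplitD_cons_close hsc]
    have hd1 : d + 1 - 1 = d := by omega
    rw [hd1]
    rw [ihy sep r d hsep hd]
    rw [pvConsH_append, pvConsH_append, pvConsH_append]
    simp

theorem pvSplitD_item : ∀ (p : List Char), pvItemV p → ∀ (sep : Char) (r : List Char),
    sep = ',' ∨ sep = '|' → pvSplitD sep (p ++ r) 0 = pvConsH p (pvSplitD sep r 0) := by
  intro p hp sep r hsep
  rcases hp with hp | ⟨x, g, y, rfl, hx, hg, hy⟩
  · exact pvSplitD_plain p sep r 0 (fun c hc =>
      ⟨by rcases hsep with rfl | rfl; exacts [(hp c hc).2.2.1, (hp c hc).2.2.2],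
        (hp c hc).1, (hp c hc).2.1⟩)
  · have hso : '[' ≠ sep := by rcases hsep with rfl | rfl <;> decide
    have hsc : ']' ≠ sep := by rcases hsep with rfl | rfl <;> decide
    have hassoc : (x ++ '[' :: (g ++ ']' :: y)) ++ r = x ++ ('[' :: (g ++ (']' :: (y ++ r)))) := by
      simp
    rw [hassoc]
    rw [pvSplitD_plain x sep _ 0 (fun c hc =>
      ⟨by rcases hsep with rfl | rfl; exacts [(hx c hc).2.2.1, (hx c hc).2.2.2],
        (hx c hc).1, (hx c hc).2.1⟩)]
    rw [pvSplitD_cons_open hso]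
    have h01 : (0 : Int) + 1 = 1 := by omega
    rw [h01]
    rw [pvSplitD_deep g false hg sep _ 1 hsep (by omega)]
    rw [pvSplitD_cons_close hsc]
    have h10 : (1 : Int) - 1 = 0 := by omega
    rw [h10]
    rw [pvSplitD_plain y sep r 0 (fun c hc =>
      ⟨by rcases hsep with rfl | rfl; exacts [(hy c hc).2.2.1, (hy c hc).2.2.2],
        (hy c hc).1, (hy c hc).2.1⟩)]
    rw [pvConsH_append, pvConsH_append, pvConsH_append, pvConsH_append]
    simp

theorem pvSplitD_seg : ∀ (items : List (List Char)), items ≠ [] → (∀ p ∈ items, pvItemV p) →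
    ∀ r, pvSplitD ',' (pvICat '|' items ++ r) 0 = pvConsH (pvICat '|' items) (pvSplitD ',' r 0) := by
  intro items
  induction items with
  | nil => exact fun h => absurd rfl h
  | cons p rest ih =>
    intro _ hall r
    cases rest with
    | nil =>
      have : pvICat '|' [p] = p := rfl
      rw [this]
      exact pvSplitD_item p (hall p (by simp)) ',' r (Or.inl rfl)
    | cons q rest' =>
      rw [pvICat_cons (by simp)]
      have hassoc : (p ++ '|' :: pvICat '|' (q :: rest')) ++ r =
          p ++ ('|' :: (pvICat '|' (q :: rest') ++ r)) := by simp
      rw [hassoc]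
      rw [pvSplitD_item p (hall p (by simp)) ',' _ (Or.inl rfl)]
      rw [pvSplitD_cons_nosplit (by decide) (by decide) (by simp)]
      rw [ih (by simp) (fun x hx => hall x (List.mem_cons_of_mem _ hx)) r]
      rw [pvConsH_append, pvConsH_append]
      simp

theorem pvSplitD_comma : ∀ (css : List (List (List Char))), css ≠ [] →
    (∀ items ∈ css, items ≠ [] ∧ ∀ p ∈ items, pvItemV p) →
    pvSplitD ',' (pvICat ',' (css.map (pvICat '|'))) 0 = css.map (pvICat '|') := by
  intro css
  induction css with
  | nil => exact fun h => absurd rfl h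
  | cons items rest ih =>
    intro _ hprops
    have hitems := hprops items (by simp)
    cases rest with
    | nil =>
      simp only [List.map_cons, List.map_nil, pvICat]
      have := pvSplitD_seg items hitems.1 hitems.2 []
      simp only [List.append_nil] at this
      rw [this]
      simp [pvSplitD, pvConsH]
    | cons b rest' =>
      rw [List.map_cons, pvICat_cons (by simp)]
      rw [pvSplitD_seg items hitems.1 hitems.2 _]
      rw [pvSplitD_cons_split (by decide) (by decide)]
      rw [ih (by simp) (fun x hx => hprops x (List.mem_cons_of_mem _ hx))]
      simp [pvConsH]

theorem pvSplitD_pipe : ∀ (items : List (List Char)), items ≠ [] → (∀ p ∈ items, pvItemV p) →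
    pvSplitD '|' (pvICat '|' items) 0 = items := by
  intro items
  induction items with
  | nil => exact fun h => absurd rfl h
  | cons p rest ih =>
    intro _ hall
    cases rest with
    | nil =>
      have h1 : pvICat '|' [p] = p := rfl
      rw [h1]
      have := pvSplitD_item p (hall p (by simp)) '|' [] (Or.inr rfl)
      simp only [List.append_nil] at this
      rw [this]
      simp [pvSplitD, pvConsH]
    | cons q rest' =>
      rw [pvICat_cons (by simp)]
      rw [pvSplitD_item p (hall p (by simp)) '|' _ (Or.inr rfl)]
      rw [pvSplitD_cons_split (by decide) (by decide)]
      rw [ih (by simp) (fun x hx => hall x (List.mem_cons_of_mem _ hx))]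
      simp [pvConsH]

-- ---------- A-side: index/slice lemmas for the bracket-splice branch ----------
theorem pvFindIdx_open {x : List Char} (h : '[' ∉ x) (r : List Char) :
    pvFindIdx '[' (x ++ '[' :: r) = some x.length := by
  induction x with
  | nil => simp [pvFindIdx]
  | cons c x' ih =>
    have hc : c ≠ '[' := fun e => h (by simp [e])
    have h' : '[' ∉ x' := fun hx => h (List.mem_cons_of_mem _ hx)
    simp [pvFindIdx, hc, ih h']

theorem pvLastIdx_append (c : Char) (a : List Char) : ∀ b : List Char,
    pvLastIdx c (a ++ b) = match pvLastIdx c b with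
      | some j => some (a.length + j)
      | none => pvLastIdx c a := by
  induction a with
  | nil => intro b; cases h : pvLastIdx c b <;> simp [pvLastIdx, h]
  | cons d a' ih =>
    intro b
    simp only [List.cons_append, pvLastIdx, ih b]
    cases h : pvLastIdx c b with
    | some j => simp [Nat.add_assoc, Nat.add_comm]
    | none => cases h2 : pvLastIdx c a' <;> simp

theorem pvLastIdx_close {y : List Char} (h : ']' ∉ y) (x g : List Char) :
    pvLastIdx ']' (x ++ '[' :: (g ++ ']' :: y)) = some (x.length + (g.length + 1)) := by
  have hassoc : x ++ '[' :: (g ++ ']' :: y) = (x ++ '[' :: g) ++ (']' :: y) := by simp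
  rw [hassoc, pvLastIdx_append]
  have hy : pvLastIdx ']' (']' :: y) = some 0 := by
    simp [pvLastIdx, pvLastIdx_none h]
  rw [hy]
  simp

-- ---------- pvICat / pvSplitAll bookkeeping ----------
theorem pvICat_mem_of_mem {c : Char} {xs : List (List Char)} {x : List Char} (hx : x ∈ xs)
    {ch : Char} (hch : ch ∈ x) : ch ∈ pvICat c xs := by
  induction xs with
  | nil => cases hx
  | cons a l ih =>
    cases l with
    | nil =>
      simp only [List.mem_singleton] at hx
      subst hx
      simpa [pvICat] using hch
    | cons b m =>
      rw [pvICat_cons (by simp)]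
      rcases List.mem_cons.mp hx with rfl | hx2
      · exact List.mem_append_left _ hch
      · exact List.mem_append_right _ (List.mem_cons_of_mem _ (ih hx2))

theorem pvICat_sep_mem {c : Char} {xs : List (List Char)} (h : 2 ≤ xs.length) :
    c ∈ pvICat c xs := by
  cases xs with
  | nil => simp at h
  | cons a l =>
    cases l with
    | nil => simp at h
    | cons b m =>
      rw [pvICat_cons (by simp)]
      simp

theorem pvICat_shorter {c : Char} {xs : List (List Char)} (h : 2 ≤ xs.length) {x : List Char}
    (hx : x ∈ xs) : x.length < (pvICat c xs).length := by
  induction xs with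
  | nil => cases hx
  | cons a l ih =>
    cases l with
    | nil => simp at h
    | cons b m =>
      rw [pvICat_cons (by simp)]
      rcases List.mem_cons.mp hx with rfl | hx2
      · simp
      · cases m with
        | nil =>
          simp only [List.mem_singleton] at hx2
          subst hx2
          simp [pvICat]
          omega
        | cons e m' =>
          have := ih (by simp) hx2
          simp only [List.length_append, List.length_cons]
          omega

theorem pvSplitAll_ne_nil (c : Char) (t : List Char) : pvSplitAll c t ≠ [] := by
  cases t with
  | nil => simp [pvSplitAll]
  | cons d t' =>
    simp only [pvSplitAll]
    by_cases hd : d = c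
    · simp [hd]
    · simp only [if_neg hd]
      cases pvSplitAll c t' <;> simp

theorem pvSplitAll_join (c : Char) : ∀ t : List Char, pvICat c (pvSplitAll c t) = t := by
  intro t
  induction t with
  | nil => rfl
  | cons d t' ih =>
    by_cases hd : d = c
    · subst hd
      show pvICat d (pvSplitAll d (d :: t')) = d :: t'
      have : pvSplitAll d (d :: t') = [] :: pvSplitAll d t' := by simp [pvSplitAll]
      rw [this, pvICat_cons (pvSplitAll_ne_nil d t')]
      simp [ih]
    · cases hsplit : pvSplitAll c t' with
      | nil => exact absurd hsplit (pvSplitAll_ne_nil c t')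
      | cons h tl =>
        have : pvSplitAll c (d :: t') = (d :: h) :: tl := by
          simp [pvSplitAll, hd, hsplit]
        rw [this]
        cases tl with
        | nil =>
          rw [hsplit] at ih
          simp only [pvICat] at ih ⊢
          simp [ih]
        | cons h2 tl2 =>
          rw [pvICat_cons (by simp)]
          rw [hsplit] at ih
          rw [pvICat_cons (by simp)] at ih
          simp [ih]

theorem pvSplitAll_free (c : Char) : ∀ (t : List Char), ∀ q ∈ pvSplitAll c t, c ∉ q := by
  intro t
  induction t with
  | nil =>
    intro q hq
    simp [pvSplitAll] at hq
    subst hq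
    simp
  | cons d t' ih =>
    intro q hq
    by_cases hd : d = c
    · subst hd
      have : pvSplitAll d (d :: t') = [] :: pvSplitAll d t' := by simp [pvSplitAll]
      rw [this] at hq
      rcases List.mem_cons.mp hq with rfl | hq2
      · simp
      · exact ih q hq2
    · cases hsplit : pvSplitAll c t' with
      | nil => exact absurd hsplit (pvSplitAll_ne_nil c t')
      | cons h tl =>
        have heq : pvSplitAll c (d :: t') = (d :: h) :: tl := by
          simp [pvSplitAll, hd, hsplit]
        rw [heq] at hq
        rcases List.mem_cons.mp hq with rfl | hq2
        · intro hmem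
          rcases List.mem_cons.mp hmem with he | hmem2
          · exact hd he.symm
          · exact ih h (hsplit ▸ List.mem_cons_self) hmem2
        · exact ih q (hsplit ▸ List.mem_cons_of_mem _ hq2)

theorem pvSplitAll_sub (c : Char) : ∀ (t : List Char), ∀ q ∈ pvSplitAll c t, ∀ ch ∈ q, ch ∈ t := by
  intro t
  induction t with
  | nil =>
    intro q hq
    simp [pvSplitAll] at hq
    subst hq
    simp
  | cons d t' ih =>
    intro q hq ch hch
    by_cases hd : d = c
    · subst hd
      have : pvSplitAll d (d :: t') = [] :: pvSplitAll d t' := by simp [pvSplitAll]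
      rw [this] at hq
      rcases List.mem_cons.mp hq with rfl | hq2
      · cases hch
      · exact List.mem_cons_of_mem _ (ih q hq2 ch hch)
    · cases hsplit : pvSplitAll c t' with
      | nil => exact absurd hsplit (pvSplitAll_ne_nil c t')
      | cons h tl =>
        have heq : pvSplitAll c (d :: t') = (d :: h) :: tl := by
          simp [pvSplitAll, hd, hsplit]
        rw [heq] at hq
        rcases List.mem_cons.mp hq with rfl | hq2
        · rcases List.mem_cons.mp hch with rfl | hch2
          · simp
          · exact List.mem_cons_of_mem _ (ih h (hsplit ▸ List.mem_cons_self) ch hch2)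
        · exact List.mem_cons_of_mem _ (ih q (hsplit ▸ List.mem_cons_of_mem _ hq2) ch hch)

theorem pvSplitAll_of_not_mem {c : Char} {t : List Char} (h : c ∉ t) : pvSplitAll c t = [t] := by
  induction t with
  | nil => rfl
  | cons d t' ih =>
    have hd : d ≠ c := fun e => h (by simp [e])
    have h' : c ∉ t' := fun hx => h (List.mem_cons_of_mem _ hx)
    simp [pvSplitAll, fun e => hd e, ih h']

theorem pvSplitAll_len_ge {c : Char} {t : List Char} (h : c ∈ t) :
    2 ≤ (pvSplitAll c t).length := by
  induction t with
  | nil => cases h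
  | cons d t' ih =>
    by_cases hd : d = c
    · subst hd
      have : pvSplitAll d (d :: t') = [] :: pvSplitAll d t' := by simp [pvSplitAll]
      rw [this]
      have := pvSplitAll_ne_nil d t'
      have hlen : 1 ≤ (pvSplitAll d t').length := by
        cases hx : pvSplitAll d t' with
        | nil => exact absurd hx this
        | cons _ _ => simp
      simp only [List.length_cons]
      omega
    · have hc : c ∈ t' := by
        rcases List.mem_cons.mp h with he | ht
        · exact absurd he.symm hd
        · exact ht
      cases hsplit : pvSplitAll c t' with
      | nil => exact absurd hsplit (pvSplitAll_ne_nil c t')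
      | cons hh tl =>
        have heq : pvSplitAll c (d :: t') = (d :: hh) :: tl := by
          simp [pvSplitAll, hd, hsplit]
        rw [heq]
        have := ih hc
        rw [hsplit] at this
        simpa using this

-- ---------- building PvLev back from items ----------
theorem pvPlain_lev : ∀ (p : List Char) (f : Bool), pvPlain p → PvLev p f := by
  intro p
  induction p with
  | nil => exact fun f _ => PvLev.nil f
  | cons c rest ih =>
    intro f hp
    have hc := hp c (by simp)
    exact PvLev.chr hc.1 hc.2.1 hc.2.2.1 hc.2.2.2
      (ih f (fun x hx => hp x (List.mem_cons_of_mem _ hx)))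

theorem pvLev_append_plain : ∀ (x t : List Char) (f : Bool), pvPlain x → PvLev t f →
    PvLev (x ++ t) f := by
  intro x
  induction x with
  | nil => exact fun t f _ h => h
  | cons c rest ih =>
    intro t f hx h
    have hc := hx c (by simp)
    exact PvLev.chr hc.1 hc.2.1 hc.2.2.1 hc.2.2.2
      (ih t f (fun z hz => hx z (List.mem_cons_of_mem _ hz)) h)

theorem pvItemV_lev : ∀ p, pvItemV p → PvLev p false := by
  intro p hp
  rcases hp with hp | ⟨x, g, y, rfl, hx, hg, hy⟩
  · exact pvPlain_lev p false hp
  · exact pvLev_append_plain x _ false hx (PvLev.grp hg (pvPlain_lev y true hy))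

theorem pvItemV_lev_sep : ∀ p c r, pvItemV p → (c = ',' ∨ c = '|') → PvLev r false →
    PvLev (p ++ c :: r) false := by
  intro p c r hp hc hr
  rcases hp with hp | ⟨x, g, y, rfl, hx, hg, hy⟩
  · exact pvLev_append_plain p _ false hp (PvLev.sep hc hr)
  · have hassoc : (x ++ '[' :: (g ++ ']' :: y)) ++ c :: r =
        x ++ '[' :: (g ++ ']' :: (y ++ c :: r)) := by simp
    rw [hassoc]
    exact pvLev_append_plain x _ false hx
      (PvLev.grp hg (pvLev_append_plain y _ true hy (PvLev.sep hc hr)))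

theorem pvSeg_lev : ∀ (items : List (List Char)), items ≠ [] → (∀ p ∈ items, pvItemV p) →
    (PvLev (pvICat '|' items) false ∧
      ∀ c r, (c = ',' ∨ c = '|') → PvLev r false → PvLev (pvICat '|' items ++ c :: r) false) := by
  intro items
  induction items with
  | nil => exact fun h => absurd rfl h
  | cons p rest ih =>
    intro _ hall
    cases rest with
    | nil =>
      refine ⟨pvItemV_lev p (hall p (by simp)), ?_⟩
      intro c r hc hr
      exact pvItemV_lev_sep p c r (hall p (by simp)) hc hr
    | cons q m =>
      have hih := ih (by simp) (fun z hz => hall z (List.mem_cons_of_mem _ hz))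
      rw [pvICat_cons (by simp)]
      constructor
      · exact pvItemV_lev_sep p '|' _ (hall p (by simp)) (Or.inr rfl) hih.1
      · intro c r hc hr
        have hassoc : (p ++ '|' :: pvICat '|' (q :: m)) ++ c :: r =
            p ++ '|' :: (pvICat '|' (q :: m) ++ c :: r) := by simp
        rw [hassoc]
        exact pvItemV_lev_sep p '|' _ (hall p (by simp)) (Or.inr rfl) (hih.2 c r hc hr)

-- ---------- misc ----------
theorem pvMap_replace : ∀ (items : List (List Char)), (∀ p ∈ items, '|' ∉ p) →
    (pvICat '|' items).map (fun c => if c = '|' then ',' else c) = pvICat ',' items := by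
  intro items
  induction items with
  | nil => intro _; rfl
  | cons p rest ih =>
    intro hall
    have hmap : p.map (fun c => if c = '|' then ',' else c) = p := by
      conv_rhs => rw [← List.map_id p]
      apply List.map_congr_left
      intro x hx
      have : x ≠ '|' := fun e => hall p (by simp) (e ▸ hx)
      simp [this]
    cases rest with
    | nil => simpa [pvICat] using hmap
    | cons q m =>
      have hL : pvICat '|' (p :: q :: m) = p ++ '|' :: pvICat '|' (q :: m) :=
        pvICat_cons (by simp)
      have hR : pvICat ',' (p :: q :: m) = p ++ ',' :: pvICat ',' (q :: m) :=
        pvICat_cons (by simp)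
      rw [hL, hR]
      simp only [List.map_append, List.map_cons]
      rw [hmap, ih (fun z hz => hall z (List.mem_cons_of_mem _ hz))]
      simp

theorem pvFilter_id {t : List Char} (h : ' ' ∉ t) : t.filter (fun c => ¬ c = ' ') = t := by
  apply List.filter_eq_self.mpr
  intro c hc
  simp only [decide_eq_true_eq]
  intro he
  exact h (he ▸ hc)

theorem pvReplA_strip {l : List Char} (h : '|' ∈ l) (fuel : Nat) :
    pvReplA (fuel + 1) l = pvReplA (fuel + 1) (l.filter (fun c => ¬ c = ' ')) := by
  have hmem : '|' ∈ l.filter (fun c => ¬ c = ' ') := List.mem_filter.mpr ⟨h, by decide⟩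
  have hsp : ' ' ∉ l.filter (fun c => ¬ c = ' ') := by
    intro hx
    have := (List.mem_filter.mp hx).2
    simp at this
  simp only [pvReplA, if_pos h, if_pos hmem, pvFilter_id hsp]

theorem pvRunBcore_single (prs : List (List Char × List Char)) (h1 : prs ≠ [])
    (h2 : ∀ pr ∈ prs, pvRunsTo pr.1 pr.2) :
    pvRunBcore (pvICat '|' (prs.map Prod.fst)) = segRender (prs.map Prod.snd) := by
  have h := pvRunBcore_csegs [prs] (by simp) (by
    intro prs' hprs'
    simp only [List.mem_singleton] at hprs'
    subst hprs'
    exact ⟨h1, h2⟩)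
  simpa [pvICat, pvJoinC] using h

theorem pvRunBcore_item {p r : List Char} (h : pvRunsTo p r) : pvRunBcore p = r := by
  have := pvRunBcore_single [(p, r)] (by simp) (by
    intro pr hpr
    simp only [List.mem_singleton] at hpr
    subst hpr
    exact h)
  simpa [pvICat, segRender] using this

theorem segRender_two (a b : List Char) (l : List (List Char)) :
    segRender (a :: b :: l) = "Union[".toList ++ pvICat ',' (a :: b :: l) ++ [']'] := rfl

theorem pvICat_le {c : Char} {xs : List (List Char)} {x : List Char} (hx : x ∈ xs) :
    x.length ≤ (pvICat c xs).length := by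
  induction xs with
  | nil => cases hx
  | cons a l ih =>
    cases l with
    | nil =>
      simp only [List.mem_singleton] at hx
      subst hx
      simp [pvICat]
    | cons b m =>
      rw [pvICat_cons (by simp)]
      rcases List.mem_cons.mp hx with rfl | hx2
      · simp
      · have := ih hx2
        simp only [List.length_append, List.length_cons]
        omega

theorem pvNB_csegs {t : List Char} (hbr : '[' ∉ t) (hcm : ∀ q ∈ pvSplitAll ',' t, ',' ∉ q) :
    pvRunBcore t = pvJoinC ((pvSplitAll ',' t).map (fun q => segRender (pvSplitAll '|' q))) := by
  have harg : pvICat ','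
      (((pvSplitAll ',' t).map (fun q => (pvSplitAll '|' q).map (fun p => (p, p)))).map
        (fun prs => pvICat '|' (prs.map Prod.fst))) = t := by
    rw [List.map_map]
    have : ((fun prs => pvICat '|' (List.map Prod.fst prs)) ∘
        fun q => (pvSplitAll '|' q).map (fun p => (p, p))) = fun q => q := by
      funext q
      simp only [Function.comp, List.map_map]
      have : (Prod.fst ∘ fun p : List Char => (p, p)) = id := rfl
      rw [this, List.map_id]
      exact pvSplitAll_join '|' q
    rw [this]
    simp only [List.map_id']
    exact pvSplitAll_join ',' t
  have key := pvRunBcore_csegs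
    ((pvSplitAll ',' t).map (fun q => (pvSplitAll '|' q).map (fun p => (p, p))))
    (by simpa using pvSplitAll_ne_nil ',' t)
    (by
      intro prs hprs
      obtain ⟨q, hq, rfl⟩ := List.mem_map.mp hprs
      refine ⟨by simpa using pvSplitAll_ne_nil '|' q, ?_⟩
      intro pr hpr
      obtain ⟨p, hp, rfl⟩ := List.mem_map.mp hpr
      exact pvRunsTo_nb p
        (fun hx => hbr (pvSplitAll_sub ',' t q hq _ (pvSplitAll_sub '|' q p hp _ hx)))
        (fun hx => hcm q hq (pvSplitAll_sub '|' q p hp _ hx))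
        (fun hx => pvSplitAll_free '|' q p hp hx))
  rw [harg] at key
  rw [key]
  congr 1
  rw [List.map_map]
  apply List.map_congr_left
  intro q hq
  simp only [Function.comp, List.map_map]
  have : (Prod.snd ∘ fun p : List Char => (p, p)) = id := rfl
  rw [this, List.map_id]

theorem pvNoPipe_core : ∀ (N : Nat) (t : List Char), t.length ≤ N →
    ' ' ∉ t → '|' ∉ t → ('[' ∈ t → PvLev t false) → pvRunBcore t = t := by
  intro N
  induction N with
  | zero =>
    intro t hlen _ _ _
    have ht : t = [] := List.eq_nil_of_length_eq_zero (Nat.le_zero.mp hlen)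
    subst ht
    rfl
  | succ N ih =>
    intro t hlen hsp hpipe hlev
    by_cases hbr : '[' ∈ t
    · obtain ⟨css, hcne, hprops, hteq⟩ := pvLev_csegs t.length t false le_rfl (hlev hbr)
      obtain ⟨cssr, hcssr_fst, hcssr_props⟩ :=
        pvChoose_css css (fun i hi p hp => (hprops i hi).2 p hp)
      have hsub : ∀ prs ∈ cssr, ∀ c ∈ pvICat '|' (prs.map Prod.fst), c ∈ t := by
        intro prs hprs c hc
        have hmemcss : prs.map Prod.fst ∈ css := by
          rw [← hcssr_fst]
          exact List.mem_map_of_mem hprs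
        rw [hteq]
        exact pvICat_mem_of_mem (List.mem_map_of_mem hmemcss) hc
      have hsingle : ∀ prs ∈ cssr, ∃ p, prs = [(p, p)] := by
        intro prs hprs
        have hmemcss : prs.map Prod.fst ∈ css := by
          rw [← hcssr_fst]
          exact List.mem_map_of_mem hprs
        have hne : prs ≠ [] := by
          intro h
          have := (hprops _ hmemcss).1
          rw [h] at this
          exact this rfl
        cases prs with
        | nil => exact absurd rfl hne
        | cons pr1 rest =>
          obtain ⟨a, b⟩ := pr1
          cases rest with
          | nil =>
            obtain ⟨hruns, hvr⟩ := hcssr_props _ hprs (a, b) (by simp)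
            rcases hvr with ⟨hpl, hrp⟩ | ⟨x, g, y, hp, hx, hg, hy, hr⟩
            · exact ⟨a, by simp only at hrp; rw [hrp]⟩
            · simp only at hp hr
              have hgsub : ∀ c ∈ g, c ∈ t := by
                intro c hc
                refine hsub [(a, b)] hprs c ?_
                simp only [List.map_cons, List.map_nil, pvICat]
                rw [hp]
                simp [hc]
              have hglen : g.length ≤ N := by
                have h1 : a.length ≤ (pvICat '|' ([(a, b)].map Prod.fst)).length :=
                  pvICat_le (by simp)
                have h2 : (pvICat '|' ([(a, b)].map Prod.fst)).length ≤ t.length := by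
                  have hm : pvICat '|' ([(a, b)].map Prod.fst) ∈ css.map (pvICat '|') :=
                    List.mem_map_of_mem (by rw [← hcssr_fst]; exact List.mem_map_of_mem hprs)
                  rw [hteq]
                  exact pvICat_le hm
                have h3 : g.length < a.length := by
                  rw [hp]
                  simp only [List.length_append, List.length_cons]
                  omega
                omega
              have hcg : pvRunBcore g = g := ih g hglen
                (fun hc => hsp (hgsub ' ' hc))
                (fun hc => hpipe (hgsub '|' hc))
                (fun _ => hg)
              refine ⟨a, ?_⟩
              have hba : b = a := by
                rw [hr, hcg, ← hp]
              rw [hba]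
          | cons pr2 rest2 =>
            exfalso
            apply hpipe
            exact hsub _ hprs '|' (pvICat_sep_mem (by simp))
      have hcssrne : cssr ≠ [] := by
        intro h
        rw [h] at hcssr_fst
        exact hcne hcssr_fst.symm
      have hBt := pvRunBcore_csegs cssr hcssrne (by
        intro prs hprs
        obtain ⟨p, rfl⟩ := hsingle prs hprs
        exact ⟨by simp, fun pr hpr => by
          simp only [List.mem_singleton] at hpr
          subst hpr
          exact (hcssr_props _ hprs _ (by simp)).1⟩)
      have harg : pvICat ',' (cssr.map (fun prs => pvICat '|' (prs.map Prod.fst))) = t := by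
        rw [hteq, ← hcssr_fst, List.map_map]
        rfl
      rw [harg] at hBt
      rw [hBt, hteq, ← hcssr_fst, List.map_map]
      congr 1
      apply List.map_congr_left
      intro prs hprs
      obtain ⟨p, rfl⟩ := hsingle prs hprs
      simp [segRender, pvICat]
    · have hcm : ∀ q ∈ pvSplitAll ',' t, ',' ∉ q := pvSplitAll_free ',' t
      rw [pvNB_csegs hbr hcm]
      have hqq : ∀ q ∈ pvSplitAll ',' t, pvSplitAll '|' q = [q] := by
        intro q hq
        exact pvSplitAll_of_not_mem (fun hx => hpipe (pvSplitAll_sub ',' t q hq _ hx))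
      have : (pvSplitAll ',' t).map (fun q => segRender (pvSplitAll '|' q)) =
          pvSplitAll ',' t := by
        conv_rhs => rw [← List.map_id (pvSplitAll ',' t)]
        apply List.map_congr_left
        intro q hq
        rw [hqq q hq]
        simp [segRender]
      rw [this]
      exact pvSplitAll_join ',' t

-- ---------- main equivalence ----------
theorem pvMain : ∀ (N fuel : Nat) (t : List Char), t.length ≤ N → t.length < fuel →
    ' ' ∉ t → ('[' ∈ t → PvLev t false) → pvReplA fuel t = pvRunBcore t := by
  intro N
  induction N with
  | zero =>
    intro fuel t hN hf hsp hlev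
    have ht : t = [] := List.eq_nil_of_length_eq_zero (Nat.le_zero.mp hN)
    subst ht
    cases fuel with
    | zero => omega
    | succ f => simp [pvReplA]; rfl
  | succ N ih =>
    intro fuel t hN hf hsp hlev
    cases fuel with
    | zero => omega
    | succ f =>
    by_cases hpipe : '|' ∈ t
    · have hfilter := pvFilter_id hsp
      by_cases hbr : '[' ∈ t
      · -- bracketed, piped: recurse through the comma/pipe/splice branches
        obtain ⟨css, hcne, hprops, hteq⟩ := pvLev_csegs t.length t false le_rfl (hlev hbr)
        obtain ⟨cssr, hcssr_fst, hcssr_props⟩ :=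
          pvChoose_css css (fun i hi p hp => (hprops i hi).2 p hp)
        have hcssrne : cssr ≠ [] := by
          intro h
          apply hcne
          rw [← hcssr_fst, h]
          rfl
        have hrunsr : ∀ prs ∈ cssr, prs ≠ [] ∧ ∀ pr ∈ prs, pvRunsTo pr.1 pr.2 := by
          intro prs hprs
          constructor
          · intro h
            have hm : prs.map Prod.fst ∈ css := by
              rw [← hcssr_fst]
              exact List.mem_map_of_mem hprs
            have := (hprops _ hm).1
            rw [h] at this
            exact this rfl
          · exact fun pr hpr => (hcssr_props _ hprs pr hpr).1
        have hitemv : ∀ prs ∈ cssr, ∀ p ∈ prs.map Prod.fst, pvItemV p := by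
          intro prs hprs p hp
          obtain ⟨pr, hpr, rfl⟩ := List.mem_map.mp hp
          rcases (hcssr_props _ hprs pr hpr).2 with ⟨h1, _⟩ | ⟨x, g, y, h1, h2, h3, h4, _⟩
          · exact Or.inl h1
          · exact Or.inr ⟨x, g, y, h1, h2, h3, h4⟩
        have harg : pvICat ',' (cssr.map (fun prs => pvICat '|' (prs.map Prod.fst))) = t := by
          rw [hteq, ← hcssr_fst, List.map_map]
          rfl
        have hBt := pvRunBcore_csegs cssr hcssrne hrunsr
        rw [harg] at hBt
        have hocsub : pvSubStrings t 0 (pvOuterScan t 0 0).1 = pvSplitD ',' t 0 := by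
          have h1 := pvSubStrings_eq_splitD ',' t [] 0
          simp only [List.nil_append, List.length_nil] at h1
          rw [pvOuterScan_eq]
          exact h1
        have hopsub : pvSubStrings t 0 (pvOuterScan t 0 0).2 = pvSplitD '|' t 0 := by
          have h1 := pvSubStrings_eq_splitD '|' t [] 0
          simp only [List.nil_append, List.length_nil] at h1
          rw [pvOuterScan_eq]
          exact h1
        have hsplitc : pvSplitD ',' t 0 = css.map (pvICat '|') := by
          conv_lhs => rw [hteq]
          exact pvSplitD_comma css hcne hprops
        have hoclen : (pvOuterScan t 0 0).1.length + 1 = css.length := by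
          have hl := pvSubStrings_length t 0 (pvOuterScan t 0 0).1
          rw [hocsub, hsplitc] at hl
          simpa using hl.symm
        simp only [pvReplA, if_pos hpipe, hfilter, if_pos hbr]
        cases css with
        | nil => exact absurd rfl hcne
        | cons items css' =>
        cases css' with
        | cons b rest' =>
          -- at least two comma segments: A joins, so does the machine
          have hocne : ¬(pvOuterScan t 0 0).1 = [] := by
            intro h
            rw [h] at hoclen
            simp at hoclen
          rw [if_pos hocne, hocsub, hsplitc, hBt]
          congr 1
          rw [← hcssr_fst, List.map_map, List.map_map]
          apply List.map_congr_left
          intro prs hprs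
          simp only [Function.comp]
          have hsegmem : pvICat '|' (prs.map Prod.fst) ∈
              (cssr.map (fun prs => List.map Prod.fst prs)).map (pvICat '|') :=
            List.mem_map_of_mem (List.mem_map_of_mem hprs)
          have hseg2 : 2 ≤ ((cssr.map (fun prs => List.map Prod.fst prs)).map (pvICat '|')).length := by
            rw [hcssr_fst]
            simp
          have hseglt : (pvICat '|' (prs.map Prod.fst)).length < t.length := by
            have h1 := pvICat_shorter (c := ',') hseg2 hsegmem
            have h2 : t = pvICat ','
                ((cssr.map (fun prs => List.map Prod.fst prs)).map (pvICat '|')) := by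
              rw [hcssr_fst, ← hteq]
            rw [h2]
            exact h1
          have hsegsub : ∀ c ∈ pvICat '|' (prs.map Prod.fst), c ∈ t := by
            intro c hc
            have h2 : t = pvICat ','
                ((cssr.map (fun prs => List.map Prod.fst prs)).map (pvICat '|')) := by
              rw [hcssr_fst, ← hteq]
            rw [h2]
            exact pvICat_mem_of_mem hsegmem hc
          have hmapne : prs.map Prod.fst ≠ [] := by
            intro h
            have := (hrunsr prs hprs).1
            cases prs with
            | nil => exact this rfl
            | cons a l => simp at h
          have hseglev : '[' ∈ pvICat '|' (prs.map Prod.fst) →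
              PvLev (pvICat '|' (prs.map Prod.fst)) false :=
            fun _ => (pvSeg_lev (prs.map Prod.fst) hmapne (hitemv prs hprs)).1
          rw [ih f (pvICat '|' (prs.map Prod.fst)) (by omega) (by omega)
            (fun hc => hsp (hsegsub ' ' hc)) hseglev]
          exact pvRunBcore_single prs (hrunsr _ hprs).1
            (fun pr hpr => (hcssr_props _ hprs pr hpr).1)
        | nil =>
          -- one comma segment
          have hoc0 : (pvOuterScan t 0 0).1 = [] := by
            have h := hoclen
            simp only [List.length_cons, List.length_nil] at h
            exact List.eq_nil_of_length_eq_zero (by omega)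
          rw [if_neg (fun hcon => hcon hoc0)]
          have hticat : t = pvICat '|' items := by simpa [pvICat] using hteq
          have hitems := hprops items (by simp)
          have hsplitp : pvSplitD '|' t 0 = items := by
            conv_lhs => rw [hticat]
            exact pvSplitD_pipe items hitems.1 hitems.2
          have hoplen : (pvOuterScan t 0 0).2.length + 1 = items.length := by
            have hl := pvSubStrings_length t 0 (pvOuterScan t 0 0).2
            rw [hopsub, hsplitp] at hl
            simpa using hl.symm
          obtain ⟨prs, rfl⟩ : ∃ prs, cssr = [prs] := by
            cases cssr with
            | nil => exact absurd rfl hcssrne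
            | cons prs rest =>
              cases rest with
              | nil => exact ⟨prs, rfl⟩
              | cons b2 r2 => simp at hcssr_fst
          have hprsfst : prs.map Prod.fst = items := by simpa using hcssr_fst
          cases prs with
          | nil =>
            exfalso
            apply hitems.1
            rw [← hprsfst]
            rfl
          | cons pr1 rest =>
          cases rest with
          | cons pr2 rest2 =>
            -- at least two pipe parts: A wraps in Union[...], so does the machine
            have hopne : ¬(pvOuterScan t 0 0).2 = [] := by
              intro h
              rw [h] at hoplen
              rw [← hprsfst] at hoplen
              simp at hoplen
            rw [if_pos hopne, hopsub, hsplitp, ← hprsfst]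
            have hmapeq : (((pr1 :: pr2 :: rest2).map Prod.fst).map (pvReplA f)) =
                (pr1 :: pr2 :: rest2).map Prod.snd := by
              rw [List.map_map]
              apply List.map_congr_left
              intro pr hpr
              simp only [Function.comp]
              have hrt := (hcssr_props _ (by simp) pr hpr).1
              have hmem : pr.1 ∈ items := by
                rw [← hprsfst]
                exact List.mem_map_of_mem hpr
              have hsubp : ∀ c ∈ pr.1, c ∈ t := fun c hc => by
                rw [hticat]
                exact pvICat_mem_of_mem hmem hc
              have h2i : 2 ≤ items.length := by
                rw [← hprsfst]
                simp
              have hlt : pr.1.length < t.length := by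
                conv_rhs => rw [hticat]
                exact pvICat_shorter h2i hmem
              have hlevp : '[' ∈ pr.1 → PvLev pr.1 false := fun _ =>
                pvItemV_lev _ (hitems.2 pr.1 hmem)
              rw [ih f pr.1 (by omega) (by omega) (fun hc => hsp (hsubp ' ' hc)) hlevp]
              exact pvRunBcore_item hrt
            rw [hmapeq, hBt]
            simp only [List.map_cons, List.map_nil, segRender_two]
            simp [pvJoinC, pvICat]
          | nil =>
            -- single item with a bracket group: A splices at first '[' / last ']'
            have hop0 : (pvOuterScan t 0 0).2 = [] := by
              rw [← hprsfst] at hoplen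
              simp only [List.map_cons, List.map_nil, List.length_cons, List.length_nil]
                at hoplen
              exact List.eq_nil_of_length_eq_zero (by omega)
            rw [if_neg (fun hcon => hcon hop0)]
            obtain ⟨a, bb⟩ := pr1
            have hvr := (hcssr_props [(a, bb)] (by simp) (a, bb) (by simp)).2
            have hta : t = a := by
              rw [hticat, ← hprsfst]
              rfl
            rcases hvr with ⟨hpl, hrp⟩ | ⟨x, g, y, hp, hx, hg, hy, hr⟩
            · exfalso
              simp only at hpl
              have := hpl '[' (hta ▸ hbr)
              exact this.1 rfl
            · simp only at hp hr
              have htp : t = x ++ '[' :: (g ++ ']' :: y) := by rw [hta, hp]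
              have hfind : pvFindIdx '[' t = some x.length := by
                rw [htp]
                exact pvFindIdx_open (fun hc => (hx '[' hc).1 rfl) _
              have hlast : pvLastIdx ']' t = some (x.length + (g.length + 1)) := by
                rw [htp]
                exact pvLastIdx_close (fun hc => (hy ']' hc).2.1 rfl) x g
              rw [hfind, hlast]
              show List.take x.length t ++ ['['] ++
                  pvReplA f (List.take (x.length + (g.length + 1) - (x.length + 1))
                    (List.drop (x.length + 1) t)) ++ [']'] ++
                  List.drop (x.length + (g.length + 1) + 1) t = pvRunBcore t
              have h1 : t.take x.length = x := by
                rw [htp]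
                exact List.take_left
              have h2 : t.drop (x.length + 1) = g ++ ']' :: y := by
                rw [htp, show x ++ '[' :: (g ++ ']' :: y) = (x ++ ['[']) ++ (g ++ ']' :: y) by
                  simp]
                rw [show x.length + 1 = (x ++ ['[']).length by simp]
                exact List.drop_left
              have h3 : x.length + (g.length + 1) - (x.length + 1) = g.length := by omega
              have h4 : (g ++ ']' :: y).take g.length = g := List.take_left
              have h5 : t.drop (x.length + (g.length + 1) + 1) = y := by
                rw [htp, show x ++ '[' :: (g ++ ']' :: y) = (x ++ '[' :: g ++ [']']) ++ y by
                  simp]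
                rw [show x.length + (g.length + 1) + 1 = (x ++ '[' :: g ++ [']']).length by
                  simp
                  omega]
                exact List.drop_left
              have hgsub : ∀ c ∈ g, c ∈ t := fun c hc => by
                rw [htp]
                simp [hc]
              have hglt : g.length < t.length := by
                rw [htp]
                simp only [List.length_append, List.length_cons]
                omega
              have hgih : pvReplA f g = pvRunBcore g := ih f g (by omega) (by omega)
                (fun hc => hsp (hgsub ' ' hc)) (fun _ => hg)
              rw [h1, h2, h3, h4, h5, hgih, hBt]
              simp only [List.map_cons, List.map_nil]
              rw [hr]
              simp [segRender, pvJoinC, pvICat]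
      · -- piped but no bracket: comma split / Union-replace
        simp only [pvReplA, if_pos hpipe, hfilter, if_neg hbr]
        have hcm := pvSplitAll_free ',' t
        have hBt := pvNB_csegs hbr hcm
        by_cases hcom : ',' ∈ t
        · rw [if_pos hcom, hBt]
          congr 1
          apply List.map_congr_left
          intro q hq
          have hsubq : ∀ c ∈ q, c ∈ t := pvSplitAll_sub ',' t q hq
          have hqlt : q.length < t.length := by
            have h2 := pvSplitAll_len_ge hcom
            conv_rhs => rw [← pvSplitAll_join ',' t]
            exact pvICat_shorter h2 hq
          have hqlev : '[' ∈ q → PvLev q false := fun hc => absurd (hsubq '[' hc) hbr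
          rw [ih f q (by omega) (by omega) (fun hc => hsp (hsubq ' ' hc)) hqlev]
          have hq1 : pvSplitAll ',' q = [q] := pvSplitAll_of_not_mem (hcm q hq)
          have hqnb := pvNB_csegs (t := q) (fun hc => hbr (hsubq '[' hc)) (by
            rw [hq1]
            intro q' hq'
            simp only [List.mem_singleton] at hq'
            subst hq'
            exact hcm _ hq)
          rw [hq1] at hqnb
          simpa [pvJoinC, pvICat] using hqnb
        · rw [if_neg hcom]
          have hps : pvSplitAll ',' t = [t] := pvSplitAll_of_not_mem hcom
          rw [hBt, hps]
          simp only [List.map_cons, List.map_nil]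
          have hrep : t.map (fun c => if c = '|' then ',' else c) =
              pvICat ',' (pvSplitAll '|' t) := by
            conv_lhs => rw [← pvSplitAll_join '|' t]
            exact pvMap_replace _ (pvSplitAll_free '|' t)
          rw [hrep]
          have hlen2 := pvSplitAll_len_ge (c := '|') hpipe
          cases hsp2 : pvSplitAll '|' t with
          | nil => rw [hsp2] at hlen2; simp at hlen2
          | cons r1 rest =>
            cases rest with
            | nil => rw [hsp2] at hlen2; simp at hlen2
            | cons r2 rest2 =>
              rw [segRender_two]
              simp [pvJoinC, pvICat]
    · have hA : pvReplA (f + 1) t = t := by simp [pvReplA, hpipe]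
      rw [hA, pvNoPipe_core (N + 1) t hN hsp hpipe hlev]


-- ===== VERDICT (by name: the statement is the Claim_ definition above) =====
theorem repl_union_py_spec : Claim_equal_repl_union_py := by
  intro s _ hpre
  show repl_union_py s = repl_union_py_alt s
  unfold repl_union_py repl_union_py_alt
  by_cases hpipe : '|' ∈ s.toList
  · rw [if_pos hpipe]
    congr 1
    rw [pvReplA_strip hpipe s.toList.length]
    have hsp : ' ' ∉ s.toList.filter (fun c => ¬ c = ' ') := by
      intro hx
      have := (List.mem_filter.mp hx).2
      simp at this
    have htlen : (s.toList.filter (fun c => ¬ c = ' ')).length ≤ s.toList.length :=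
      List.length_filter_le _ _
    have hlev : '[' ∈ s.toList.filter (fun c => ¬ c = ' ') →
        PvLev (s.toList.filter (fun c => ¬ c = ' ')) false := by
      intro hbrt
      rcases hpre with h | h | h
      · exact absurd hpipe h
      · exact absurd hbrt h
      · exact pvWfS_toLev _ _ false le_rfl (pvWf_sound _ 0 false h)
    exact pvMain _ (s.toList.length + 1) _ le_rfl (by omega) hsp hlev
  · rw [if_neg hpipe]
    have hA : pvReplA (s.toList.length + 1) s.toList = s.toList := by
      simp [pvReplA, hpipe]
    rw [hA]
    simp
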